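-- pv_equiv track=rewrite | github.com/miracle078/application-security-engineering | 3-security-automation/security-scanner-tool.py | _group_findings_by_tool
-- ===== SOURCE A (Python) =====
-- def _group_findings_by_tool(findings):
--     """Group findings by scanning tool"""
--     grouped = {}
--
--     for finding in findings:
--         tool = finding.get('tool', 'Unknown')
--         if tool not in grouped:
--             grouped[tool] = []
--         grouped[tool].append(finding)
--
--     return {tool: len(findings) for tool, findings in grouped.items()}
-- ===== SOURCE B (Python) =====
-- def _group_findings_by_tool(findings):
--     """Group findings by scanning tool"""
--     if not findings:
--         return {}
--     tool = findings[0].get('tool', 'Unknown')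
--     counts = _group_findings_by_tool(findings[1:])
--     return {tool: 1 + counts.pop(tool, 0), **counts}
-- ===== Notes on version B (the rewrite author's own statement) =====
-- stated objective: alternative
-- what changed: B replaces A's two-stage iterative grouping (fold findings into a dict of lists, then a second comprehension taking len of each list) by structural recursion: group the tail recursively, then pop the head's tool count and re-insert it incremented at the front, which preserves first-occurrence order.
import Mathlib
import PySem

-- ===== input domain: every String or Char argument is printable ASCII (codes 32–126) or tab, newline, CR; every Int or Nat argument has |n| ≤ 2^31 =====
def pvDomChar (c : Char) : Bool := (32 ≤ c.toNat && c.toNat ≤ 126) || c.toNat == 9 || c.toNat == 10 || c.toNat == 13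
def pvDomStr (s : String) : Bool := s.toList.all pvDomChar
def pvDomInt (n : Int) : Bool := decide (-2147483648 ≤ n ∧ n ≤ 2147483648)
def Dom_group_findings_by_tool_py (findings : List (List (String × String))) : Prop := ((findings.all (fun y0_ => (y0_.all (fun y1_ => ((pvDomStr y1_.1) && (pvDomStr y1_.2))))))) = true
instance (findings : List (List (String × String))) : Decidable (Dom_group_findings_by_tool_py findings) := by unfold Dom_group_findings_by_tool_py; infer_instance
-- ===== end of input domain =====

-- B replaces A's iterative dict-of-lists grouping by structural recursion on the list: count the head's
-- tool as 1 + its count in the recursively grouped tail, popped and re-inserted at the front (objective: alternative).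
-- ===== PORT A =====
def group_findings_by_tool_py (findings : List (List (String × String))) : List (String × Int) :=
  let grouped : PySem.Dict String (List (List (String × String))) :=
    findings.foldl (fun grouped finding =>
      let tool := (PySem.Dict.mk finding).getD "tool" "Unknown"
      let grouped := if grouped.contains tool then grouped else grouped.insert tool []
      grouped.modify tool [] (fun l => l ++ [finding])) PySem.Dict.empty
  grouped.items.map (fun p => (p.1, (p.2.length : Int)))

-- ===== PORT B =====
def group_findings_by_tool_py_alt : List (List (String × String)) → List (String × Int)
  | [] => []
  | finding :: rest =>
    let tool := (PySem.Dict.mk finding).getD "tool" "Unknown"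
    let counts := PySem.Dict.mk (group_findings_by_tool_py_alt rest)
    -- {tool: 1 + counts.pop(tool, 0), **counts}
    (tool, 1 + counts.getD tool 0) :: (counts.erase tool).items

-- ===== PRECONDITION & SPEC =====
def Spec_group_findings_by_tool_py (findings : List (List (String × String))) (out : List (String × Int)) : Prop := out = group_findings_by_tool_py_alt findings
instance (findings : List (List (String × String))) (out : List (String × Int)) : Decidable (Spec_group_findings_by_tool_py findings out) := by unfold Spec_group_findings_by_tool_py; infer_instance

-- ===== CLAIM (what is proved, stated in full; the proofs are below) =====
def Claim_equal_group_findings_by_tool_py : Prop := ∀ (findings : List (List (String × String))), Dom_group_findings_by_tool_py findings → Spec_group_findings_by_tool_py findings (group_findings_by_tool_py findings)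

-- ===== LEMMAS AND PROOFS =====

-- the tool key a finding contributes
def pvKey (finding : List (String × String)) : String :=
  (PySem.Dict.mk finding).getD "tool" "Unknown"

-- common normal form both programs are reduced to: distinct tools in first-occurrence order, each with its count
def pvNorm (findings : List (List (String × String))) : List (String × Int) :=
  (PySem.Set.ofList (findings.map pvKey)).map (fun t => (t, ((findings.map pvKey).count t : Int)))

-- A's loop body (insert-if-absent, then append via modify) is a single keyed insert.
theorem pv_step_eq (g : PySem.Dict String (List (List (String × String)))) (t : String)
    (f : List (String × String)) :
    (if g.contains t then g else g.insert t []).modify t [] (fun l => l ++ [f])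
      = g.insert t (g.getD t [] ++ [f]) := by
  by_cases h : g.contains t = true
  · simp only [h, if_true]
    show g.insert t (g.getD t [] ++ [f]) = _
    rfl
  · simp only [h]
    show (g.insert t []).insert t ((g.insert t []).getD t [] ++ [f]) = _
    rw [PySem.Dict.getD_insert_self, PySem.Dict.insert_insert_self,
        PySem.Dict.getD_of_not_contains g [] (by simpa using h)]

-- the grouping fold's lookup accumulates the matching findings
theorem pv_getD_fold (l : List (List (String × String)))
    (key : List (String × String) → String)
    (d : PySem.Dict String (List (List (String × String)))) (t : String) :
    (l.foldl (fun g f => g.insert (key f) (g.getD (key f) [] ++ [f])) d).getD t []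
      = d.getD t [] ++ l.filter (fun f => key f == t) := by
  induction l generalizing d with
  | nil => simp
  | cons f l ih =>
    simp only [List.foldl_cons, List.filter_cons, ih]
    rw [PySem.Dict.getD_insert]
    by_cases h : t = key f
    · simp [h]
    · simp only [if_neg h, beq_iff_eq]
      rw [if_neg (fun h' => h h'.symm)]

-- A computes the normal form
theorem pv_A_eq (findings : List (List (String × String))) :
    group_findings_by_tool_py findings = pvNorm findings := by
  unfold group_findings_by_tool_py pvNorm
  simp only [pv_step_eq]
  have hnd : (findings.foldl (fun g f => g.insert (pvKey f) (g.getD (pvKey f) [] ++ [f]))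
      PySem.Dict.empty).keys.Nodup :=
    PySem.Dict.nodup_keys_foldl_insert_key findings pvKey _ _ (by simp)
  rw [show (fun (g : PySem.Dict String (List (List (String × String)))) f =>
        g.insert ((PySem.Dict.mk f).getD "tool" "Unknown") (g.getD ((PySem.Dict.mk f).getD "tool" "Unknown") [] ++ [f]))
      = (fun g f => g.insert (pvKey f) (g.getD (pvKey f) [] ++ [f])) from rfl]
  rw [PySem.Dict.items_eq_map_keys _ hnd [], PySem.Dict.keys_foldl_insert_key]
  simp only [PySem.Dict.keys_empty, PySem.Set.update_nil_left, List.map_map]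
  apply List.map_congr_left
  intro t _
  simp only [Function.comp_apply, pv_getD_fold, PySem.Dict.getD_empty, List.nil_append,
    Prod.mk.injEq, true_and]
  rw [List.count_eq_countP, List.countP_map, List.countP_eq_length_filter]
  rfl

-- B computes the same normal form, by structural recursion
theorem pv_B_eq : ∀ (findings : List (List (String × String))),
    group_findings_by_tool_py_alt findings = pvNorm findings
  | [] => by simp [group_findings_by_tool_py_alt, pvNorm]
  | f :: rest => by
    have ih := pv_B_eq rest
    show (pvKey f, 1 + (PySem.Dict.mk (group_findings_by_tool_py_alt rest)).getD (pvKey f) 0) ::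
        ((PySem.Dict.mk (group_findings_by_tool_py_alt rest)).erase (pvKey f)).items
        = pvNorm (f :: rest)
    rw [ih]
    unfold pvNorm
    set t := pvKey f with ht
    set ts := rest.map pvKey with hts
    have hkeys : (PySem.Dict.mk ((PySem.Set.ofList ts).map
        (fun u => (u, ((ts.count u : Int)))))).keys = PySem.Set.ofList ts := by
      simp [PySem.Dict.keys, Function.comp_def]
    have hnd : (PySem.Dict.mk ((PySem.Set.ofList ts).map
        (fun u => (u, ((ts.count u : Int)))))).keys.Nodup := by
      rw [hkeys]; exact PySem.Set.nodup_ofList ts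
    have hget : (PySem.Dict.mk ((PySem.Set.ofList ts).map
        (fun u => (u, ((ts.count u : Int)))))).getD t 0 = (ts.count t : Int) := by
      by_cases hmem : t ∈ ts
      · have hin : (t, (ts.count t : Int)) ∈ (PySem.Set.ofList ts).map
            (fun u => (u, ((ts.count u : Int)))) :=
          List.mem_map.mpr ⟨t, (PySem.Set.mem_ofList ts t).mpr hmem, rfl⟩
        exact PySem.Dict.getD_of_mem_items _ hin hnd 0
      · rw [PySem.Dict.getD_of_not_contains, List.count_eq_zero_of_not_mem hmem]
        · simp
        · rw [PySem.Dict.contains_eq_decide_mem_keys, hkeys]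
          simp [PySem.Set.mem_ofList, hmem]
    have herase : ((PySem.Dict.mk ((PySem.Set.ofList ts).map
        (fun u => (u, ((ts.count u : Int)))))).erase t).items
        = ((PySem.Set.ofList ts).filter (fun u => !(u == t))).map
            (fun u => (u, ((ts.count u : Int)))) := by
      show List.filter _ _ = _
      rw [List.filter_map]
      rfl
    rw [hget, herase]
    have hmapcons : (f :: rest).map pvKey = t :: ts := by simp [ht, hts]
    rw [hmapcons, PySem.Set.ofList_cons, List.map_cons]
    refine List.cons_eq_cons.mpr ⟨?_, ?_⟩
    · rw [List.count_cons_self]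
      refine Prod.ext rfl ?_
      push_cast; ring
    · show _ = (PySem.Set.discard (PySem.Set.ofList ts) t).map _
      unfold PySem.Set.discard
      apply List.map_congr_left
      intro u hu
      have hne : ¬ (u == t) = true := by
        have := (List.mem_filter.mp hu).2
        simpa using this
      have hne' : ¬ t = u := fun h => hne (by simp [h])
      rw [List.count_cons_of_ne hne']

-- ===== VERDICT (by name: the statement is the Claim_ definition above) =====
theorem group_findings_by_tool_py_spec : Claim_equal_group_findings_by_tool_py := by
  intro findings _
  show group_findings_by_tool_py findings = group_findings_by_tool_py_alt findings
  rw [pv_A_eq, pv_B_eq]
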